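-- pv_equiv track=rewrite | github.com/Freezee198/TAD2 | src/prepare_data.py | collect_images
-- ===== SOURCE A (Python) =====
-- def collect_images(image_files, class_names):
--     image_file_list0 = []
--     image_label_list0 = []
--     for i, class_name in enumerate(class_names):
--         image_file_list0.extend(image_files[i])
--         image_label_list0.extend([i] * len(image_files[i]))
--     image_file_list = []
--     image_label_list = []
--     for i, path in enumerate(image_file_list0):
--         IMG0 = path.split('.')[-1]
--         if IMG0 != 'svg' and IMG0 != 'gif':
--             image_file_list += [path]
--             image_label_list += [image_label_list0[i]]
--     return image_file_list, image_label_list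
-- ===== SOURCE B (Python) =====
-- def collect_images(image_files, class_names):
--     image_file_list = []
--     image_label_list = []
--     for i, (class_name, paths) in enumerate(zip(class_names, image_files)):
--         for path in paths:
--             ext = path.split('.')[-1]
--             if ext != 'svg' and ext != 'gif':
--                 image_file_list.append(path)
--                 image_label_list.append(i)
--     return image_file_list, image_label_list
-- ===== Notes on version B (the rewrite author's own statement) =====
-- stated objective: simpler
-- what changed: Fuses A's two passes (materialize flattened file/label lists, then filter them by extension) into one nested loop over zip(class_names, image_files) that filters and labels each path directly, with no intermediate lists.
import Mathlib
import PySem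

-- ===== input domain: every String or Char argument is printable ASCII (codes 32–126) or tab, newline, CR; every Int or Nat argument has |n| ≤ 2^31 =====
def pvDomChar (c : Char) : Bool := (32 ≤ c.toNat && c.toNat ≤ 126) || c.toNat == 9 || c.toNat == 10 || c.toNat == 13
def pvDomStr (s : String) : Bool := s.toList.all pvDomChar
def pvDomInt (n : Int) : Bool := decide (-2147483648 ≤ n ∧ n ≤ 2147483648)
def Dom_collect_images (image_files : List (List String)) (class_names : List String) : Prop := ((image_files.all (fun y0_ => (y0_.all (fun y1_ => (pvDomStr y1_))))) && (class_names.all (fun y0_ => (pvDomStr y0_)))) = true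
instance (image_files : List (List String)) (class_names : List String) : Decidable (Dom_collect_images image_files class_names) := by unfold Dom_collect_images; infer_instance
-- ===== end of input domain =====

-- B fuses A's flatten pass and filter pass into one nested loop over zip(class_names, image_files); same cost, no intermediate lists.

-- shared helper: path.split('.')[-1] and the extension test (identical line in both Pythons)
def pvKeep (path : String) : Bool :=
  let ext := (PySem.List.pyGet? ((PySem.Str.split? path ".").getD []) (-1)).getD ""
  ext != "svg" && ext != "gif"

-- ===== PORT A =====
def collect_images (image_files : List (List String)) (class_names : List String) : List String × List Int :=
  -- first loop: flatten files and labels (image_files[i] is in range under Pre_)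
  let s0 := (PySem.List.enumerate class_names 0).foldl
    (fun (acc : List String × List Int) p =>
      (acc.1 ++ (PySem.List.pyGet? image_files p.1).getD [],
       acc.2 ++ PySem.List.pyRepeat [p.1] (((PySem.List.pyGet? image_files p.1).getD []).length : Int)))
    ([], [])
  -- second loop: filter by extension, looking the label up at the same index
  (PySem.List.enumerate s0.1 0).foldl
    (fun (acc : List String × List Int) p =>
      if pvKeep p.2 then (acc.1 ++ [p.2], acc.2 ++ [(PySem.List.pyGet? s0.2 p.1).getD 0]) else acc)
    ([], [])

-- ===== PORT B =====
def collect_images_alt (image_files : List (List String)) (class_names : List String) : List String × List Int :=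
  (PySem.List.enumerate (class_names.zip image_files) 0).foldl
    (fun (acc : List String × List Int) p =>
      p.2.2.foldl
        (fun (acc : List String × List Int) path =>
          if pvKeep path then (acc.1 ++ [path], acc.2 ++ [p.1]) else acc)
        acc)
    ([], [])

-- ===== PRECONDITION & SPEC =====
-- Pre_ excludes exactly the inputs where A raises IndexError (class_names longer than image_files).
def Pre_collect_images (image_files : List (List String)) (class_names : List String) : Prop :=
  class_names.length ≤ image_files.length
instance (image_files : List (List String)) (class_names : List String) : Decidable (Pre_collect_images image_files class_names) := by unfold Pre_collect_images; infer_instance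

def pvWitness_collect_images : List (List String) × List String :=
  ([["a.png", "b.svg"], ["c.gif", "d"]], ["x", "y"])

def Spec_collect_images (image_files : List (List String)) (class_names : List String) (out : List String × List Int) : Prop := out = collect_images_alt image_files class_names
instance (image_files : List (List String)) (class_names : List String) (out : List String × List Int) : Decidable (Spec_collect_images image_files class_names out) := by unfold Spec_collect_images; infer_instance

-- ===== CLAIM =====
def Claim_equal_collect_images : Prop := ∀ (image_files : List (List String)) (class_names : List String), Dom_collect_images image_files class_names → Pre_collect_images image_files class_names → Spec_collect_images image_files class_names (collect_images image_files class_names)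

-- ===== LEMMAS AND PROOFS =====

-- reference results, per chunk list with a running label
def pvGF : List (List String) → List String
  | [] => []
  | f :: t => f.filter pvKeep ++ pvGF t
def pvGL : List (List String) → Int → List Int
  | [], _ => []
  | f :: t, s => (f.filter pvKeep).map (fun _ => s) ++ pvGL t (s + 1)

-- flattened (unfiltered) reference results for A's first loop
def pvFF : List (List String) → List String
  | [] => []
  | f :: t => f ++ pvFF t
def pvFL : List (List String) → Int → List Int
  | [], _ => []
  | f :: t, s => List.replicate f.length s ++ pvFL t (s + 1)

theorem pvFF_len_FL (l : List (List String)) (s : Int) : (pvFF l).length = (pvFL l s).length := by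
  induction l generalizing s with
  | nil => rfl
  | cons f t ih => simp [pvFF, pvFL]; exact ih (s + 1)

-- B's inner loop
theorem b_inner (paths : List String) (i : Int) (acc : List String × List Int) :
    paths.foldl (fun (acc : List String × List Int) path =>
        if pvKeep path then (acc.1 ++ [path], acc.2 ++ [i]) else acc) acc
      = (acc.1 ++ paths.filter pvKeep, acc.2 ++ (paths.filter pvKeep).map (fun _ => i)) := by
  induction paths generalizing acc with
  | nil => simp
  | cons p t ih =>
    by_cases h : pvKeep p = true <;> simp [List.foldl_cons, h, ih]

-- B's outer loop
theorem b_outer (l : List (String × List String)) (s : Int) (acc : List String × List Int) :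
    (PySem.List.enumerate l s).foldl
      (fun (acc : List String × List Int) p =>
        p.2.2.foldl
          (fun (acc : List String × List Int) path =>
            if pvKeep path then (acc.1 ++ [path], acc.2 ++ [p.1]) else acc)
          acc) acc
      = (acc.1 ++ pvGF (l.map (·.2)) , acc.2 ++ pvGL (l.map (·.2)) s) := by
  induction l generalizing s acc with
  | nil => simp [PySem.List.enumerate_nil, pvGF, pvGL]
  | cons q t ih =>
    rw [PySem.List.enumerate_cons, List.foldl_cons, b_inner, ih]
    simp [pvGF, pvGL]

-- A's first loop (under the length precondition, with absolute start index)
theorem a_phase1 (image_files : List (List String)) (cn : List String) (s : Nat)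
    (acc : List String × List Int) (h : s + cn.length ≤ image_files.length) :
    (PySem.List.enumerate cn (s : Int)).foldl
      (fun (acc : List String × List Int) p =>
        (acc.1 ++ (PySem.List.pyGet? image_files p.1).getD [],
         acc.2 ++ PySem.List.pyRepeat [p.1] (((PySem.List.pyGet? image_files p.1).getD []).length : Int)))
      acc
      = (acc.1 ++ pvFF ((image_files.drop s).take cn.length),
         acc.2 ++ pvFL ((image_files.drop s).take cn.length) s) := by
  induction cn generalizing s acc with
  | nil => simp [PySem.List.enumerate_nil, pvFF, pvFL]
  | cons c t ih =>
    have hs : s < image_files.length := by simp at h; omega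
    have hget : PySem.List.pyGet? image_files (s : Int) = some image_files[s] := by
      rw [PySem.List.pyGet?_natCast]
      simp [hs]
    have hdrop : image_files.drop s = image_files[s] :: image_files.drop (s + 1) :=
      List.drop_eq_getElem_cons hs
    have hcast : ((s : Int) + 1) = ((s + 1 : Nat) : Int) := by push_cast; ring
    have ih' := ih (s + 1) (acc.1 ++ image_files[s],
        acc.2 ++ PySem.List.pyRepeat [(s : Int)] (image_files[s].length : Int)) (by simp at h ⊢; omega)
    simp only [PySem.List.enumerate_cons, List.foldl_cons, hget, Option.getD_some, hcast, ih',
      hdrop, List.length_cons, List.take_succ_cons, pvFF, pvFL]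
    simp [PySem.List.pyRepeat_singleton]

-- A's second loop: labels looked up at the running index
theorem a_phase2 (lab0 : List Int) (l0 : List String) (s : Nat)
    (acc : List String × List Int) (h : s + l0.length ≤ lab0.length) :
    (PySem.List.enumerate l0 (s : Int)).foldl
      (fun (acc : List String × List Int) p =>
        if pvKeep p.2 then (acc.1 ++ [p.2], acc.2 ++ [(PySem.List.pyGet? lab0 p.1).getD 0]) else acc)
      acc
      = (acc.1 ++ ((l0.zip (lab0.drop s)).filter (fun q => pvKeep q.1)).map (·.1),
         acc.2 ++ ((l0.zip (lab0.drop s)).filter (fun q => pvKeep q.1)).map (·.2)) := by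
  induction l0 generalizing s acc with
  | nil => simp [PySem.List.enumerate_nil]
  | cons p t ih =>
    have hs : s < lab0.length := by simp at h; omega
    have hget : PySem.List.pyGet? lab0 (s : Int) = some lab0[s] := by
      rw [PySem.List.pyGet?_natCast]
      simp [hs]
    have hdrop : lab0.drop s = lab0[s] :: lab0.drop (s + 1) := List.drop_eq_getElem_cons hs
    have hcast : ((s : Int) + 1) = ((s + 1 : Nat) : Int) := by push_cast; ring
    by_cases hk : pvKeep p = true
    · have ih' := ih (s + 1) (acc.1 ++ [p], acc.2 ++ [lab0[s]]) (by simp at h ⊢; omega)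
      simp only [PySem.List.enumerate_cons, List.foldl_cons, hk, if_pos, hget, Option.getD_some,
        hcast, ih', hdrop, List.zip_cons_cons, List.filter_cons]
      simp
    · have ih' := ih (s + 1) acc (by simp at h ⊢; omega)
      simp only [PySem.List.enumerate_cons, List.foldl_cons, hget,
        hdrop, List.zip_cons_cons, List.filter_cons]
      simp only [hk, if_false, Bool.false_eq_true]
      rw [hcast]
      simpa [hk] using ih'

theorem zip_replicate_const (f : List String) (s : Int) :
    f.zip (List.replicate f.length s) = f.map (fun x => (x, s)) := by
  induction f with
  | nil => rfl
  | cons a b ihb => simp [List.replicate_succ, ihb]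

-- the crux: filtering the flattened lists chunkwise equals the fused per-chunk results
theorem zip_flat_filter (chunks : List (List String)) (s : Int) :
    (((pvFF chunks).zip (pvFL chunks s)).filter (fun q => pvKeep q.1)).map (·.1) = pvGF chunks ∧
    (((pvFF chunks).zip (pvFL chunks s)).filter (fun q => pvKeep q.1)).map (·.2) = pvGL chunks s := by
  induction chunks generalizing s with
  | nil => simp [pvFF, pvFL, pvGF, pvGL]
  | cons f t ih =>
    have hlen : f.length = (List.replicate f.length s).length := by simp
    have hz : (f ++ pvFF t).zip (List.replicate f.length s ++ pvFL t (s + 1))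
        = f.zip (List.replicate f.length s) ++ (pvFF t).zip (pvFL t (s + 1)) :=
      List.zip_append hlen
    have hchunk := zip_replicate_const f s
    obtain ⟨ih1, ih2⟩ := ih (s + 1)
    constructor <;>
      simp [pvFF, pvFL, pvGF, pvGL, hz, hchunk, List.filter_append, List.filter_map,
        ih1, ih2, List.map_map, Function.comp_def]

-- map snd of a zip is a prefix of the second list
theorem map_snd_zip_eq_take (cn : List String) (fs : List (List String)) :
    ((cn.zip fs).map (·.2)) = fs.take cn.length := by
  induction cn generalizing fs with
  | nil => simp
  | cons c t ih =>
    cases fs with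
    | nil => simp
    | cons f r => simp [ih]

-- ===== VERDICT =====
theorem collect_images_spec : Claim_equal_collect_images := by
  intro image_files class_names _ hpre
  unfold Spec_collect_images collect_images collect_images_alt
  have hA := a_phase1 image_files class_names 0 ([], []) (by simpa using hpre)
  simp only [Nat.cast_zero, List.drop_zero, List.nil_append] at hA
  rw [hA]
  have hlen := pvFF_len_FL (image_files.take class_names.length) 0
  have hP := a_phase2 (pvFL (image_files.take class_names.length) 0)
      (pvFF (image_files.take class_names.length)) 0 ([], []) (by omega)
  simp only [Nat.cast_zero, List.drop_zero, List.nil_append] at hP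
  rw [hP, b_outer, map_snd_zip_eq_take]
  simp only [List.nil_append]
  obtain ⟨h1, h2⟩ := zip_flat_filter (image_files.take class_names.length) 0
  rw [h1, h2]
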